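-- pv_equiv track=rewrite | github.com/hahyuning/Coding-test-study | programmers/level 3/숫자 게임.py | solution
-- ===== SOURCE A (Python) =====
-- import bisect
--
-- def solution(a, b):
--     answer = 0
--     a = [-x for x in a]
--     b = [-x for x in b]
--     a.sort()
--     b.sort()
--
--     for x in a:
--         j = bisect.bisect_left(b, x)
--         if j == 0:
--             b.pop()
--             continue
--
--         b.remove(b[j - 1])
--         answer += 1
--     return answer
-- ===== SOURCE B (Python) =====
-- def solution(a, b):
--     a = sorted(a, reverse=True)
--     b = sorted(b, reverse=True)
--     count = 0
--     i = 0
--     for x in a: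
--         if i < len(b) and b[i] > x:
--             count += 1
--             i += 1
--     return count
-- ===== Notes on version B (the rewrite author's own statement) =====
-- stated objective: faster
-- what changed: Replaces the per-element bisect + list.remove/pop loop (quadratic list surgery) by sorting both lists descending once and doing a single two-pointer greedy pass.
import Mathlib
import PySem

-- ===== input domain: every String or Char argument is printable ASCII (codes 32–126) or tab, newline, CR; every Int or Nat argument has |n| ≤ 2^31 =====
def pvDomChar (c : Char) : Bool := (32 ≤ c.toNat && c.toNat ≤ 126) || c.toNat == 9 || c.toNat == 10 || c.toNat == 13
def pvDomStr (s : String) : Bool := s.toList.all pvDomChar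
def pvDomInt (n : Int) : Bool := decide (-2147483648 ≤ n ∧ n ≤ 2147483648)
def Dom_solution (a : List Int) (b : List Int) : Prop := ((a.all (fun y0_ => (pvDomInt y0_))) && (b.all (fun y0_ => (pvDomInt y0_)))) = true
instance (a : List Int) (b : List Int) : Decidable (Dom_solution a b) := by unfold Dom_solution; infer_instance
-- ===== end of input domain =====

-- B replaces A's bisect + remove/pop list surgery by one descending two-pointer greedy pass; equal return value wherever A returns.


-- ===== PORT A =====
-- the for-loop of A; state = (answer, current b); none exactly where Python raises (b.pop() on empty b)
def pvALoop : List Int → Int → List Int → Option Int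
  | [], ans, _ => some ans
  | x :: rest, ans, b =>
    let j := PySem.List.bisectLeft b x
    if j = 0 then
      match PySem.List.pop? b with
      | none => none
      | some (_, b') => pvALoop rest ans b'
    else
      match PySem.List.pyGet? b ((j : Int) - 1) with
      | none => none
      | some v =>
        match PySem.List.remove? b v with
        | none => none
        | some b' => pvALoop rest (ans + 1) b'

def solution (a : List Int) (b : List Int) : Int :=
  let a1 := PySem.List.sorted (a.map (fun x => -x)) (fun x => x)   -- a = [-x for x in a]; a.sort()
  let b1 := PySem.List.sorted (b.map (fun x => -x)) (fun x => x)   -- b = [-x for x in b]; b.sort()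
  (pvALoop a1 0 b1).getD 0   -- the getD default is unreachable under Pre_solution (Python raises IndexError there)

-- ===== PORT B =====
def solution_alt (a : List Int) (b : List Int) : Int :=
  let a1 := PySem.List.sorted a (fun x => x) true   -- sorted(a, reverse=True)
  let b1 := PySem.List.sorted b (fun x => x) true   -- sorted(b, reverse=True)
  (a1.foldl
    (fun (st : Int × Nat) x =>
      if st.2 < b1.length ∧ b1.getD st.2 0 > x then (st.1 + 1, st.2 + 1) else st)
    (0, 0)).1   -- st = (count, i); the getD is the guarded b[i]

-- ===== PRECONDITION & SPEC =====
-- Pre_ excludes exactly len(a) > len(b): there A's b.pop() eventually raises IndexError (A removes one b element per a element).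
def Pre_solution (a : List Int) (b : List Int) : Prop := a.length ≤ b.length
instance (a : List Int) (b : List Int) : Decidable (Pre_solution a b) := by unfold Pre_solution; infer_instance
def pvWitness_solution : List Int × List Int := ([1], [2, 3])

def Spec_solution (a : List Int) (b : List Int) (out : Int) : Prop := out = solution_alt a b
instance (a : List Int) (b : List Int) (out : Int) : Decidable (Spec_solution a b out) := by unfold Spec_solution; infer_instance

-- ===== CLAIM (what is proved, stated in full; the proofs are below) =====
def Claim_equal_solution : Prop := ∀ (a : List Int) (b : List Int), Dom_solution a b → Pre_solution a b → Spec_solution a b (solution a b)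

-- ===== LEMMAS AND PROOFS =====
-- Both ports sort into the NEGATED space; all reasoning below is there: lists ascending, "y beats x" = y < x.
-- A's greedy: match each a element (ascending = original descending) with its greatest beater, else discard max b.
-- B's greedy: two pointers. They are bridged through pvF (A's core) and pvG (B's core):
--   pvF_cap shows beaters above every pending a element are interchangeable, pvF_drop_max that
--   discarding the max of a strictly larger b is free, and pvF_eq_pvG combines them.

-- max(l) by value (0 for [], never used there)
def pvMax (l : List Int) : Int := (PySem.List.max? l (fun y => y)).getD 0

def pvF : List Int → List Int → Int
  | [], _ => 0
  | x :: a, b =>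
    let S := b.filter (fun y => y < x)
    if S ≠ [] then 1 + pvF a (b.erase (pvMax S))
    else if b = [] then pvF a b
    else pvF a (b.erase (pvMax b))

def pvG : List Int → List Int → Int
  | [], _ => 0
  | _ :: _, [] => 0
  | x :: a, y :: b => if y < x then 1 + pvG a b else pvG a (y :: b)

theorem pvMax_spec {l : List Int} (h : l ≠ []) : pvMax l ∈ l ∧ ∀ y ∈ l, y ≤ pvMax l := by
  unfold pvMax
  obtain ⟨m, hm⟩ := Option.ne_none_iff_exists'.mp (fun hn => h ((PySem.List.max?_eq_none_iff l (fun y => y)).mp hn))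
  rw [hm]
  exact ⟨PySem.List.max?_mem hm, PySem.List.max?_isMax hm⟩

theorem pvMax_eq_of {l : List Int} {m : Int} (hm : m ∈ l) (hmax : ∀ y ∈ l, y ≤ m) : pvMax l = m := by
  have h : l ≠ [] := by rintro rfl; exact absurd hm (List.not_mem_nil)
  obtain ⟨h1, h2⟩ := pvMax_spec h
  exact le_antisymm (hmax _ h1) (h2 _ hm)

theorem pvMax_perm {l1 l2 : List Int} (h : l1.Perm l2) : pvMax l1 = pvMax l2 := by
  rcases eq_or_ne l1 [] with rfl | h1
  · rw [h.nil_eq]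
  · have h2 : l2 ≠ [] := fun hh => h1 (List.Perm.eq_nil (hh ▸ h))
    obtain ⟨m1, a1⟩ := pvMax_spec h1
    obtain ⟨m2, a2⟩ := pvMax_spec h2
    exact le_antisymm (a2 _ (h.mem_iff.mp m1)) (a1 _ (h.mem_iff.mpr m2))

theorem pvF_perm (a : List Int) : ∀ {b1 b2 : List Int}, b1.Perm b2 → pvF a b1 = pvF a b2 := by
  induction a with
  | nil => intro b1 b2 _; simp [pvF]
  | cons x a ih =>
    intro b1 b2 hp
    have hf : (b1.filter (fun y => y < x)).Perm (b2.filter (fun y => y < x)) := hp.filter _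
    have hmax : pvMax (b1.filter (fun y => y < x)) = pvMax (b2.filter (fun y => y < x)) := pvMax_perm hf
    have hnil : b1.filter (fun y => y < x) = [] ↔ b2.filter (fun y => y < x) = [] :=
      ⟨fun h => (h ▸ hf).symm.eq_nil, fun h => (h ▸ hf.symm).symm.eq_nil⟩
    have hbnil : b1 = [] ↔ b2 = [] := ⟨fun h => (h ▸ hp).symm.eq_nil, fun h => (h ▸ hp.symm).symm.eq_nil⟩
    simp only [pvF]
    by_cases hS : b1.filter (fun y => y < x) = []
    · have hS2 : b2.filter (fun y => y < x) = [] := hnil.mp hS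
      simp only [hS, hS2, ne_eq, not_true_eq_false, if_false, if_neg]
      by_cases hb : b1 = []
      · simp [hb, hbnil.mp hb]
      · have hb2 : b2 ≠ [] := fun h => hb (hbnil.mpr h)
        have hmb : pvMax b1 = pvMax b2 := pvMax_perm hp
        simp only [hb, hb2, if_neg, if_false]
        rw [hmb]
        exact ih (hp.erase _)
    · have hS2 : b2.filter (fun y => y < x) ≠ [] := fun h => hS (hnil.mpr h)
      simp only [ne_eq, hS, hS2, not_false_eq_true, if_true]
      rw [hmax]
      exact congrArg (1 + ·) (ih (hp.erase _))

-- helpers on erase/filter/countP (Int lists)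
theorem erase_filter_perm_pos {b : List Int} {z : Int} (hz : z ∈ b) {p : Int → Bool} (hp : p z = true) :
    ((b.erase z).filter p).Perm ((b.filter p).erase z) := by
  have h1 : b.Perm (z :: b.erase z) := List.perm_cons_erase hz
  have h2 : (b.filter p).Perm ((z :: b.erase z).filter p) := h1.filter p
  rw [List.filter_cons, if_pos hp] at h2
  have h3 : ((b.filter p).erase z).Perm (((z :: ((b.erase z).filter p)).erase z)) := h2.erase z
  rw [List.erase_cons_head] at h3
  exact h3.symm

theorem erase_filter_perm_neg {b : List Int} {z : Int} (hz : z ∈ b) {p : Int → Bool} (hp : p z = false) :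
    ((b.erase z).filter p).Perm (b.filter p) := by
  have h1 : b.Perm (z :: b.erase z) := List.perm_cons_erase hz
  have h2 : (b.filter p).Perm ((z :: b.erase z).filter p) := h1.filter p
  rw [List.filter_cons, if_neg (by simp [hp])] at h2
  exact h2.symm

theorem countP_erase {b : List Int} {z : Int} (hz : z ∈ b) (p : Int → Bool) :
    b.countP p = (b.erase z).countP p + (if p z then 1 else 0) := by
  have h1 : b.Perm (z :: b.erase z) := List.perm_cons_erase hz
  rw [h1.countP_eq, List.countP_cons]

-- beater decomposition: with c ≤ x, beaters of x split into the ≥c ("mid") and <c ("low") parts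
theorem beater_split {b : List Int} {c x : Int} (hcx : c ≤ x) :
    (b.filter (fun y => y < x)).Perm
      (((b.filter (fun y => c ≤ y)).filter (fun y => y < x)) ++ b.filter (fun y => y < c)) := by
  have h := (List.filter_append_perm (fun y => decide (c ≤ y)) (b.filter (fun y => y < x))).symm
  have e1 : (b.filter (fun y => y < x)).filter (fun y => c ≤ y)
      = (b.filter (fun y => c ≤ y)).filter (fun y => y < x) := by
    rw [List.filter_filter, List.filter_filter]
    exact List.filter_congr (fun y _ => by by_cases h1 : c ≤ y <;> by_cases h2 : y < x <;> simp [h1, h2])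
  have e2 : (b.filter (fun y => y < x)).filter (fun y => !decide (c ≤ y)) = b.filter (fun y => y < c) := by
    rw [List.filter_filter]
    exact List.filter_congr (fun y _ => by by_cases h1 : c ≤ y <;> by_cases h2 : y < x <;> simp [h1, h2] <;> omega)
  rw [e1, e2] at h
  exact h

theorem mem_of_mem_midf {b : List Int} {c x y : Int}
    (h : y ∈ (b.filter (fun y => c ≤ y)).filter (fun y => y < x)) : y ∈ b.filter (fun y => y < x) := by
  simp only [List.mem_filter] at h ⊢
  exact ⟨h.1.1, h.2⟩

-- max of the beaters is the max of the mid part when the mid part is nonempty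
theorem pvMax_beaters_eq_mid {b : List Int} {c x : Int}
    (hm : (b.filter (fun y => c ≤ y)).filter (fun y => y < x) ≠ []) :
    pvMax (b.filter (fun y => y < x)) = pvMax ((b.filter (fun y => c ≤ y)).filter (fun y => y < x)) := by
  obtain ⟨hmem, hmax⟩ := pvMax_spec hm
  apply pvMax_eq_of (mem_of_mem_midf hmem)
  intro y hy
  simp only [List.mem_filter] at hy hmem
  by_cases hcy : c ≤ y
  · exact hmax y (by simp only [List.mem_filter]; exact ⟨⟨hy.1, by simpa using hcy⟩, hy.2⟩)
  · have : (c : Int) ≤ pvMax ((b.filter (fun y => c ≤ y)).filter (fun y => y < x)) := by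
      simpa using hmem.1.2
    omega

theorem pvF_cap (a : List Int) : ∀ (b1 b2 : List Int) (c : Int), (∀ t ∈ a, c ≤ t) →
    (b1.filter (fun y => c ≤ y)).Perm (b2.filter (fun y => c ≤ y)) →
    b1.countP (fun y => y < c) = b2.countP (fun y => y < c) →
    pvF a b1 = pvF a b2 := by
  induction a with
  | nil => intro b1 b2 c _ _ _; simp [pvF]
  | cons x a ih =>
    intro b1 b2 c hc hper hcnt
    have hcx : c ≤ x := hc x List.mem_cons_self
    have hca : ∀ t ∈ a, c ≤ t := fun t ht => hc t (List.mem_cons_of_mem _ ht)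
    have hmidper : ((b1.filter (fun y => c ≤ y)).filter (fun y => y < x)).Perm
        ((b2.filter (fun y => c ≤ y)).filter (fun y => y < x)) := hper.filter _
    have hsplit1 := beater_split (b := b1) hcx
    have hsplit2 := beater_split (b := b2) hcx
    have hlowlen : (b1.filter (fun y => y < c)).length = (b2.filter (fun y => y < c)).length := by
      rw [← List.countP_eq_length_filter, ← List.countP_eq_length_filter]; exact hcnt
    have hlen1 : (b1.filter (fun y => y < x)).length
        = ((b1.filter (fun y => c ≤ y)).filter (fun y => y < x)).length + (b1.filter (fun y => y < c)).length := by
      rw [hsplit1.length_eq, List.length_append]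
    have hlen2 : (b2.filter (fun y => y < x)).length
        = ((b2.filter (fun y => c ≤ y)).filter (fun y => y < x)).length + (b2.filter (fun y => y < c)).length := by
      rw [hsplit2.length_eq, List.length_append]
    have hcl1 : b1.countP (fun y => y < c) = (b1.filter (fun y => y < c)).length :=
      List.countP_eq_length_filter
    have hcl2 : b2.countP (fun y => y < c) = (b2.filter (fun y => y < c)).length :=
      List.countP_eq_length_filter
    by_cases hm : (b1.filter (fun y => c ≤ y)).filter (fun y => y < x) = []
    · have hm2 : (b2.filter (fun y => c ≤ y)).filter (fun y => y < x) = [] :=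
        (hm ▸ hmidper).symm.eq_nil
      have hml1 : ((b1.filter (fun y => c ≤ y)).filter (fun y => y < x)).length = 0 := by rw [hm]; rfl
      have hml2 : ((b2.filter (fun y => c ≤ y)).filter (fun y => y < x)).length = 0 := by rw [hm2]; rfl
      by_cases hl : b1.countP (fun y => y < c) = 0
      · -- no beaters at all on either side
        have hS1 : b1.filter (fun y => y < x) = [] :=
          List.eq_nil_of_length_eq_zero (by omega)
        have hS2 : b2.filter (fun y => y < x) = [] :=
          List.eq_nil_of_length_eq_zero (by omega)
        by_cases hb1 : b1 = []
        · have hb2 : b2 = [] := by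
            have hhigh : b2.filter (fun y => c ≤ y) = [] := by
              subst hb1; simpa using hper.symm.eq_nil
            have hlen := List.length_eq_countP_add_countP (p := fun y => decide (c ≤ y)) (l := b2)
            have hqq : b2.countP (fun a => decide ¬(decide (c ≤ a)) = true) = b2.countP (fun y => y < c) := by
              apply List.countP_congr; intro y _; by_cases h : c ≤ y <;> simp [h] <;> omega
            have hp0 : b2.countP (fun y => c ≤ y) = 0 := by
              rw [List.countP_eq_length_filter, hhigh]; rfl
            apply List.eq_nil_of_length_eq_zero; omega
          subst hb1 hb2; rfl
        · have hh1 : b1.filter (fun y => c ≤ y) ≠ [] := by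
            intro hh
            have hlen := List.length_eq_countP_add_countP (p := fun y => decide (c ≤ y)) (l := b1)
            have hqq : b1.countP (fun a => decide ¬(decide (c ≤ a)) = true) = b1.countP (fun y => y < c) := by
              apply List.countP_congr; intro y _; by_cases h : c ≤ y <;> simp [h] <;> omega
            have hp0 : b1.countP (fun y => c ≤ y) = 0 := by
              rw [List.countP_eq_length_filter, hh]; rfl
            exact hb1 (List.eq_nil_of_length_eq_zero (by omega))
          have hh2 : b2.filter (fun y => c ≤ y) ≠ [] := fun hh => hh1 (hh ▸ hper.symm).symm.eq_nil
          have hb2 : b2 ≠ [] := fun hh => hh2 (by subst hh; rfl)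
          have hmax1 : pvMax b1 = pvMax (b1.filter (fun y => c ≤ y)) := by
            obtain ⟨hmem, hmax⟩ := pvMax_spec hh1
            apply pvMax_eq_of (List.mem_of_mem_filter hmem)
            intro y hy
            by_cases hcy : c ≤ y
            · exact hmax y (List.mem_filter.mpr ⟨hy, by simpa using hcy⟩)
            · have : (c : Int) ≤ pvMax (b1.filter (fun y => c ≤ y)) := by
                simpa using (List.mem_filter.mp hmem).2
              omega
          have hmax2 : pvMax b2 = pvMax (b2.filter (fun y => c ≤ y)) := by
            obtain ⟨hmem, hmax⟩ := pvMax_spec hh2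
            apply pvMax_eq_of (List.mem_of_mem_filter hmem)
            intro y hy
            by_cases hcy : c ≤ y
            · exact hmax y (List.mem_filter.mpr ⟨hy, by simpa using hcy⟩)
            · have : (c : Int) ≤ pvMax (b2.filter (fun y => c ≤ y)) := by
                simpa using (List.mem_filter.mp hmem).2
              omega
          have hmaxeq : pvMax b1 = pvMax b2 := by rw [hmax1, hmax2, pvMax_perm hper]
          have hz1 : pvMax b1 ∈ b1 := (pvMax_spec hb1).1
          have hz2 : pvMax b2 ∈ b2 := (pvMax_spec hb2).1
          have hpz1 : (decide (c ≤ pvMax b1)) = true := by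
            rw [hmax1]; simpa using (List.mem_filter.mp (pvMax_spec hh1).1).2
          have hpz2 : (decide (c ≤ pvMax b2)) = true := by
            rw [hmax2]; simpa using (List.mem_filter.mp (pvMax_spec hh2).1).2
          simp only [pvF, hS1, hS2, ne_eq, not_true_eq_false, if_false, hb1, hb2, if_neg]
          apply ih _ _ c hca
          · exact ((erase_filter_perm_pos hz1 hpz1).trans
              ((hper.erase _).trans
                (by rw [hmaxeq]; exact (erase_filter_perm_pos hz2 hpz2).symm)))
          · have c1 := countP_erase hz1 (fun y => decide (y < c))
            have c2 := countP_erase hz2 (fun y => decide (y < c))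
            have hq1 : (decide (pvMax b1 < c)) = false := by simp at hpz1 ⊢; omega
            have hq2 : (decide (pvMax b2 < c)) = false := by simp at hpz2 ⊢; omega
            rw [hq1] at c1; rw [hq2] at c2
            simpa [c1, c2] using hcnt
      · -- beaters exist, all of them < c (low); erase one low beater on each side
        have hS1 : b1.filter (fun y => y < x) ≠ [] := by
          intro hS
          have h0 : (b1.filter (fun y => y < x)).length = 0 := by rw [hS]; rfl
          omega
        have hS2 : b2.filter (fun y => y < x) ≠ [] := by
          intro hS
          have h0 : (b2.filter (fun y => y < x)).length = 0 := by rw [hS]; rfl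
          omega
        have hz1S := (pvMax_spec hS1).1
        have hz2S := (pvMax_spec hS2).1
        have hz1b : pvMax (b1.filter (fun y => y < x)) ∈ b1 := List.mem_of_mem_filter hz1S
        have hz2b : pvMax (b2.filter (fun y => y < x)) ∈ b2 := List.mem_of_mem_filter hz2S
        have hz1c : pvMax (b1.filter (fun y => y < x)) < c := by
          by_contra hcc
          apply List.ne_nil_of_mem (a := pvMax (b1.filter (fun y => y < x))) _ hm
          simp only [List.mem_filter] at hz1S ⊢
          exact ⟨⟨hz1S.1, by simpa using (by omega : c ≤ pvMax (b1.filter (fun y => y < x)))⟩, hz1S.2⟩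
        have hz2c : pvMax (b2.filter (fun y => y < x)) < c := by
          by_contra hcc
          apply List.ne_nil_of_mem (a := pvMax (b2.filter (fun y => y < x))) _ hm2
          simp only [List.mem_filter] at hz2S ⊢
          exact ⟨⟨hz2S.1, by simpa using (by omega : c ≤ pvMax (b2.filter (fun y => y < x)))⟩, hz2S.2⟩
        simp only [pvF, ne_eq, hS1, hS2, not_false_eq_true, if_true]
        congr 1
        apply ih _ _ c hca
        · exact ((erase_filter_perm_neg hz1b (by simp; omega)).trans
            (hper.trans (erase_filter_perm_neg hz2b (by simp; omega)).symm))
        · have c1 := countP_erase hz1b (fun y => decide (y < c))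
          have c2 := countP_erase hz2b (fun y => decide (y < c))
          rw [if_pos (by simpa using hz1c)] at c1
          rw [if_pos (by simpa using hz2c)] at c2
          omega
    · -- mid part nonempty: the erased beater is the same value ≥ c on both sides
      have hm2 : (b2.filter (fun y => c ≤ y)).filter (fun y => y < x) ≠ [] :=
        fun hh => hm (hh ▸ hmidper.symm).symm.eq_nil
      have hS1 : b1.filter (fun y => y < x) ≠ [] :=
        List.ne_nil_of_mem (mem_of_mem_midf (pvMax_spec hm).1)
      have hS2 : b2.filter (fun y => y < x) ≠ [] :=
        List.ne_nil_of_mem (mem_of_mem_midf (pvMax_spec hm2).1)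
      have e1 := pvMax_beaters_eq_mid (b := b1) (c := c) (x := x) hm
      have e2 := pvMax_beaters_eq_mid (b := b2) (c := c) (x := x) hm2
      have hmeq : pvMax (b1.filter (fun y => y < x)) = pvMax (b2.filter (fun y => y < x)) := by
        rw [e1, e2, pvMax_perm hmidper]
      have hz1b : pvMax (b1.filter (fun y => y < x)) ∈ b1 := List.mem_of_mem_filter (pvMax_spec hS1).1
      have hz2b : pvMax (b2.filter (fun y => y < x)) ∈ b2 := List.mem_of_mem_filter (pvMax_spec hS2).1
      have hzc : (decide (c ≤ pvMax (b1.filter (fun y => y < x)))) = true := by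
        rw [e1]; simpa using (List.mem_filter.mp (List.mem_of_mem_filter (pvMax_spec hm).1)).2
      have hzc2 : (decide (c ≤ pvMax (b2.filter (fun y => y < x)))) = true := by rw [← hmeq]; exact hzc
      simp only [pvF, ne_eq, hS1, hS2, not_false_eq_true, if_true]
      congr 1
      apply ih _ _ c hca
      · exact ((erase_filter_perm_pos hz1b hzc).trans
          ((hper.erase _).trans
            (by rw [hmeq]; exact (erase_filter_perm_pos hz2b hzc2).symm)))
      · have c1 := countP_erase hz1b (fun y => decide (y < c))
        have c2 := countP_erase hz2b (fun y => decide (y < c))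
        rw [if_neg (by simp at hzc ⊢; omega)] at c1
        rw [if_neg (by simp at hzc2 ⊢; omega)] at c2
        omega

theorem pvF_drop_max (a : List Int) : ∀ (b : List Int), a.length < b.length →
    pvF a (b.erase (pvMax b)) = pvF a b := by
  induction a with
  | nil => intro b _; simp [pvF]
  | cons x a ih =>
    intro b hlen
    have hb : b ≠ [] := by intro h; subst h; simp at hlen
    obtain ⟨hM, hMmax⟩ := pvMax_spec hb
    have hlenE : (b.erase (pvMax b)).length = b.length - 1 := List.length_erase_of_mem hM
    have hbE : b.erase (pvMax b) ≠ [] := by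
      intro h
      have : (b.erase (pvMax b)).length = 0 := by rw [h]; rfl
      simp at hlen; omega
    by_cases hS : b.filter (fun y => y < x) = []
    · have hS' : (b.erase (pvMax b)).filter (fun y => y < x) = [] := by
        have hsub := (List.erase_sublist (l := b) (a := pvMax b)).filter (fun y => decide (y < x))
        rw [hS] at hsub
        exact List.sublist_nil.mp hsub
      simp only [pvF, hS, hS', ne_eq, not_true_eq_false, if_false, hb, hbE, if_neg]
      exact ih _ (by simp at hlen ⊢; omega)
    · obtain ⟨hzS, hzmax⟩ := pvMax_spec hS
      have hzb : pvMax (b.filter (fun y => y < x)) ∈ b := List.mem_of_mem_filter hzS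
      have hzx : pvMax (b.filter (fun y => y < x)) < x := by
        simpa using (List.mem_filter.mp hzS).2
      by_cases hzM : pvMax (b.filter (fun y => y < x)) = pvMax b
      · -- all of b is below x
        have hall : ∀ y ∈ b, y < x := fun y hy => lt_of_le_of_lt (hMmax y hy) (hzM ▸ hzx)
        have hfb : b.filter (fun y => y < x) = b :=
          List.filter_eq_self.mpr (fun y hy => by simpa using hall y hy)
        have hallE : ∀ y ∈ b.erase (pvMax b), y < x := fun y hy => hall y (List.mem_of_mem_erase hy)
        have hfbE : (b.erase (pvMax b)).filter (fun y => y < x) = b.erase (pvMax b) :=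
          List.filter_eq_self.mpr (fun y hy => by simpa using hallE y hy)
        simp only [pvF, hfb, hfbE, ne_eq, hb, hbE, not_false_eq_true, if_true]
        congr 1
        rw [ih _ (by simp at hlen ⊢; omega)]
      · -- the max of b is ≥ x; erasing it commutes with the matched erase
        have hMx : x ≤ pvMax b := by
          by_contra hc
          have : pvMax b ∈ b.filter (fun y => y < x) :=
            List.mem_filter.mpr ⟨hM, by simpa using (by omega : pvMax b < x)⟩
          exact hzM (le_antisymm (hMmax _ hzb) (hzmax _ this))
        have hSE : ((b.erase (pvMax b)).filter (fun y => y < x)).Perm (b.filter (fun y => y < x)) :=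
          erase_filter_perm_neg hM (by simp; omega)
        have hSEne : (b.erase (pvMax b)).filter (fun y => y < x) ≠ [] := by
          intro h; exact hS (h ▸ hSE).symm.eq_nil
        have hmaxE : pvMax ((b.erase (pvMax b)).filter (fun y => y < x))
            = pvMax (b.filter (fun y => y < x)) := pvMax_perm hSE
        have hMez : pvMax (b.erase (pvMax (b.filter (fun y => y < x)))) = pvMax b := by
          apply pvMax_eq_of
          · exact (List.mem_erase_of_ne (fun h => hzM h.symm)).mpr hM
          · exact fun y hy => hMmax y (List.mem_of_mem_erase hy)
        simp only [pvF, ne_eq, hS, hSEne, not_false_eq_true, if_true]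
        congr 1
        rw [hmaxE, List.erase_comm]
        have hlen2 : a.length < (b.erase (pvMax (b.filter (fun y => y < x)))).length := by
          rw [List.length_erase_of_mem hzb]; simp at hlen ⊢; omega
        rw [← hMez, ih _ hlen2]

theorem pvF_eq_pvG (a : List Int) : ∀ (b : List Int), a.Pairwise (· ≤ ·) → b.Pairwise (· ≤ ·) →
    a.length ≤ b.length → pvF a b = pvG a b := by
  induction a with
  | nil => intro b _ _ _; simp [pvF, pvG]
  | cons x a ih =>
    intro b hpa hpb hlen
    match b with
    | [] => simp at hlen
    | y :: b'' =>
      have hx : ∀ t ∈ a, x ≤ t := (List.pairwise_cons.mp hpa).1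
      have hpa' := (List.pairwise_cons.mp hpa).2
      have hy : ∀ t ∈ b'', y ≤ t := (List.pairwise_cons.mp hpb).1
      have hpb' := (List.pairwise_cons.mp hpb).2
      by_cases hyx : y < x
      · have hS : (y :: b'').filter (fun t => t < x) ≠ [] :=
          List.ne_nil_of_mem (List.mem_filter.mpr ⟨List.mem_cons_self, by simpa using hyx⟩)
        obtain ⟨hzS, hzmax⟩ := pvMax_spec hS
        have hzb : pvMax ((y :: b'').filter (fun t => t < x)) ∈ y :: b'' := List.mem_of_mem_filter hzS
        have hzx : pvMax ((y :: b'').filter (fun t => t < x)) < x := by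
          simpa using (List.mem_filter.mp hzS).2
        simp only [pvF, pvG, ne_eq, hS, not_false_eq_true, if_true, if_pos hyx]
        congr 1
        have hcap : pvF a ((y :: b'').erase (pvMax ((y :: b'').filter (fun t => t < x)))) = pvF a b'' := by
          apply pvF_cap a _ _ x hx
          · have h1 := erase_filter_perm_neg hzb (p := fun t => decide (x ≤ t)) (by simp; omega)
            have h2 := erase_filter_perm_neg (List.mem_cons_self (a := y) (l := b''))
              (p := fun t => decide (x ≤ t)) (by simp; omega)
            rw [List.erase_cons_head] at h2
            exact h1.trans h2.symm
          · have c1 := countP_erase hzb (fun t => decide (t < x))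
            rw [if_pos (by simpa using hzx)] at c1
            have c2 : List.countP (fun t => decide (t < x)) (y :: b'')
                = List.countP (fun t => decide (t < x)) b'' + 1 := by
              rw [List.countP_cons, if_pos (by simpa using hyx)]
            omega
        rw [hcap]
        exact ih b'' hpa' hpb' (by simp at hlen ⊢; omega)
      · have hS : (y :: b'').filter (fun t => t < x) = [] := by
          rw [List.filter_eq_nil_iff]
          intro t ht
          rcases List.mem_cons.mp ht with rfl | ht'
          · simpa using hyx
          · have := hy t ht'; simp; omega
        have hbne : (y : Int) :: b'' ≠ [] := List.cons_ne_nil _ _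
        simp only [pvF, pvG, ne_eq, hS, not_true_eq_false, if_false, hbne, if_neg hyx]
        rw [pvF_drop_max a _ (by simp at hlen ⊢; omega)]
        exact ih _ hpa' hpb (by simp at hlen ⊢; omega)

-- a prefix-true/suffix-false predicate filters to the prefix

theorem filter_eq_take (p : Int → Bool) : ∀ (l : List Int) (j : Nat), j ≤ l.length →
    (∀ (k : Nat) (hk : k < l.length), k < j → p l[k] = true) →
    (∀ (k : Nat) (hk : k < l.length), j ≤ k → p l[k] = false) →
    l.filter p = l.take j := by
  intro l
  induction l with
  | nil => intro j hj _ _; simp at hj; simp [hj]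
  | cons h t ih =>
    intro j hj htrue hfalse
    match j with
    | 0 =>
      simp only [List.take_zero]
      rw [List.filter_eq_nil_iff]
      intro y hy
      obtain ⟨k, hk, rfl⟩ := List.mem_iff_getElem.mp hy
      simp [hfalse k hk (Nat.zero_le _)]
    | j' + 1 =>
      have hp : p h = true := htrue 0 (by simp) (Nat.succ_pos _)
      simp only [List.filter_cons, if_pos hp, List.take_succ_cons]
      congr 1
      apply ih j' (by simpa using hj)
      · intro k hk hkj
        have := htrue (k + 1) (by simpa using hk) (by omega)
        simpa using this
      · intro k hk hkj
        have := hfalse (k + 1) (by simpa using hk) (by omega)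
        simpa using this

theorem pvMax_take (bL : List Int) (j : Nat) (hpb : bL.Pairwise (· ≤ ·))
    (hj0 : 0 < j) (hjlen : j ≤ bL.length) :
    pvMax (bL.take j) = bL[j - 1]'(by omega) := by
  apply pvMax_eq_of
  · have h : (bL.take j)[j-1]'(by simp [List.length_take]; omega) = bL[j-1]'(by omega) :=
      List.getElem_take
    exact h ▸ List.getElem_mem _
  · intro y hy
    obtain ⟨k, hk, rfl⟩ := List.mem_iff_getElem.mp hy
    have hkj : k < j := by simp [List.length_take] at hk; omega
    rw [List.getElem_take]
    rcases Nat.lt_or_ge k (j - 1) with h | h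
    · exact (List.pairwise_iff_getElem.mp hpb) k (j-1) (by simp [List.length_take] at hk; omega) (by omega) h
    · have : k = j - 1 := by omega
      subst this; exact le_refl _

-- sorted: the last element is the max
theorem pvMax_sorted_getLast (bL : List Int) (hpb : bL.Pairwise (· ≤ ·)) (hb : bL ≠ []) :
    pvMax bL = bL.getLast hb := by
  apply pvMax_eq_of (List.getLast_mem hb)
  intro y hy
  obtain ⟨k, hk, rfl⟩ := List.mem_iff_getElem.mp hy
  rw [List.getLast_eq_getElem]
  rcases Nat.lt_or_ge k (bL.length - 1) with h | h
  · exact (List.pairwise_iff_getElem.mp hpb) k (bL.length - 1) hk (by omega) h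
  · have : k = bL.length - 1 := by omega
    subst this; exact le_refl _

theorem pvALoop_eq (aL : List Int) : ∀ (ans : Int) (bL : List Int), bL.Pairwise (· ≤ ·) →
    aL.length ≤ bL.length → pvALoop aL ans bL = some (ans + pvF aL bL) := by
  induction aL with
  | nil => intro ans bL _ _; simp [pvALoop, pvF]
  | cons x aL ih =>
    intro ans bL hpb hlen
    obtain ⟨hjlen, htrue, hfalse⟩ := PySem.List.bisectLeft_spec bL x hpb
    have hfil : bL.filter (fun y => y < x) = bL.take (PySem.List.bisectLeft bL x) := by
      apply filter_eq_take _ _ _ hjlen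
      · intro k hk hkj; simpa using htrue k hk hkj
      · intro k hk hkj; simpa using Int.not_lt.mpr (hfalse k hk hkj)
    by_cases hj : PySem.List.bisectLeft bL x = 0
    · -- no b element beats x: Python pops the last element
      have hbne : bL ≠ [] := by
        intro h; subst h; simp at hlen
      have hS : bL.filter (fun y => y < x) = [] := by rw [hfil, hj]; simp
      have hpop : PySem.List.pop? bL = some (bL.getLast hbne, bL.dropLast) := by
        conv_lhs => rw [← List.dropLast_append_getLast hbne]
        exact PySem.List.pop?_last _ _
      simp only [pvALoop, hj, if_pos rfl, hpop]
      rw [ih ans bL.dropLast (hpb.sublist (List.dropLast_sublist bL)) (by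
        rw [List.length_dropLast]; simp at hlen ⊢; omega)]
      congr 1
      have hperm : bL.dropLast.Perm (bL.erase (pvMax bL)) := by
        have h1 : bL.Perm (pvMax bL :: bL.erase (pvMax bL)) :=
          List.perm_cons_erase (pvMax_spec hbne).1
        have h2 : bL.Perm (bL.getLast hbne :: bL.dropLast) := by
          conv_lhs => rw [← List.dropLast_append_getLast hbne]
          exact List.perm_append_comm
        rw [pvMax_sorted_getLast bL hpb hbne]
        exact (h2.symm.trans (pvMax_sorted_getLast bL hpb hbne ▸ h1)).cons_inv
      rw [pvF_perm aL hperm]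
      simp only [pvF, hS, ne_eq, not_true_eq_false, if_false, hbne, if_neg]
      simp [hbne]
    · -- Python removes b[j-1], the greatest element below x
      have hj1 : 1 ≤ PySem.List.bisectLeft bL x := Nat.one_le_iff_ne_zero.mpr hj
      have hget : PySem.List.pyGet? bL ((PySem.List.bisectLeft bL x : Int) - 1)
          = some (bL[PySem.List.bisectLeft bL x - 1]'(by omega)) := by
        have hcast : ((PySem.List.bisectLeft bL x : Int) - 1)
            = ((PySem.List.bisectLeft bL x - 1 : Nat) : Int) := by push_cast [hj1]; ring
        rw [hcast, PySem.List.pyGet?_natCast]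
        exact List.getElem?_eq_getElem (by omega)
      have hvmem : bL[PySem.List.bisectLeft bL x - 1]'(by omega) ∈ bL := List.getElem_mem _
      have hrem : PySem.List.remove? bL (bL[PySem.List.bisectLeft bL x - 1]'(by omega))
          = some (bL.erase (bL[PySem.List.bisectLeft bL x - 1]'(by omega))) :=
        PySem.List.remove?_eq_some_erase bL _ hvmem
      have hS : bL.filter (fun y => y < x) ≠ [] := by
        rw [hfil]
        intro h
        have : (bL.take (PySem.List.bisectLeft bL x)).length = 0 := by rw [h]; rfl
        rw [List.length_take] at this
        omega
      have hmax : pvMax (bL.filter (fun y => y < x)) = bL[PySem.List.bisectLeft bL x - 1]'(by omega) := by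
        rw [hfil]; exact pvMax_take bL _ hpb (by omega) hjlen
      simp only [pvALoop, if_neg hj, hget, hrem]
      rw [ih (ans + 1) _ (hpb.sublist (List.erase_sublist))
        (by rw [List.length_erase_of_mem hvmem]; simp at hlen ⊢; omega)]
      congr 1
      simp only [pvF, ne_eq, hS, not_false_eq_true, if_true, hmax]
      ring

theorem pvG_nil_right (aL : List Int) : pvG aL [] = 0 := by
  cases aL <;> rfl

theorem pvBLoop_eq (aL : List Int) : ∀ (bL : List Int) (cnt : Int) (i : Nat),
    (aL.foldl (fun (st : Int × Nat) x =>
        if st.2 < bL.length ∧ bL.getD st.2 0 > x then (st.1 + 1, st.2 + 1) else st) (cnt, i)).1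
      = cnt + pvG (aL.map (fun x => -x)) ((bL.drop i).map (fun x => -x)) := by
  induction aL with
  | nil => intro bL cnt i; simp [pvG]
  | cons x aL ih =>
    intro bL cnt i
    simp only [List.foldl_cons, List.map_cons]
    by_cases hi : i < bL.length
    · have hdrop : bL.drop i = bL[i] :: bL.drop (i + 1) := List.drop_eq_getElem_cons hi
      have hgetD : bL.getD i 0 = bL[i] := List.getD_eq_getElem bL 0 hi
      by_cases hgt : bL[i] > x
      · rw [if_pos (by exact ⟨hi, by rw [hgetD]; exact hgt⟩)]
        rw [ih bL (cnt + 1) (i + 1)]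
        rw [hdrop]
        simp only [List.map_cons, pvG, if_pos (by omega : -bL[i] < -x)]
        ring
      · rw [if_neg (by rw [hgetD]; exact fun h => hgt h.2)]
        rw [ih bL cnt i, hdrop]
        simp only [List.map_cons, pvG, if_neg (by omega : ¬ -bL[i] < -x)]
    · rw [if_neg (fun h => hi h.1)]
      rw [ih bL cnt i]
      have hdrop : bL.drop i = [] := List.drop_eq_nil_of_le (by omega)
      rw [hdrop]
      simp [pvG_nil_right]

theorem sorted_neg (l : List Int) :
    PySem.List.sorted (l.map (fun x => -x)) (fun x => x)
      = (PySem.List.sorted l (fun x => x) true).map (fun x => -x) := by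
  apply PySem.List.sorted_id_eq_of_perm_of_pairwise
  · exact (PySem.List.sorted_perm l (fun x => x) true).map _
  · exact (PySem.List.sorted_pairwise_rev l (fun x => x)).map _ (fun hab => by omega)

theorem pvFinal (a b : List Int) (h : a.length ≤ b.length) : solution a b = solution_alt a b := by
  show (pvALoop (PySem.List.sorted (a.map (fun x => -x)) (fun x => x)) 0
      (PySem.List.sorted (b.map (fun x => -x)) (fun x => x))).getD 0
    = ((PySem.List.sorted a (fun x => x) true).foldl
        (fun (st : Int × Nat) x =>
          if st.2 < (PySem.List.sorted b (fun x => x) true).length ∧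
              (PySem.List.sorted b (fun x => x) true).getD st.2 0 > x
          then (st.1 + 1, st.2 + 1) else st) (0, 0)).1
  have hpa : (PySem.List.sorted (a.map (fun x => -x)) (fun x => x)).Pairwise (· ≤ ·) := by
    simpa using PySem.List.sorted_pairwise (a.map (fun x => -x)) (fun x => x)
  have hpb : (PySem.List.sorted (b.map (fun x => -x)) (fun x => x)).Pairwise (· ≤ ·) := by
    simpa using PySem.List.sorted_pairwise (b.map (fun x => -x)) (fun x => x)
  have hlen : (PySem.List.sorted (a.map (fun x => -x)) (fun x => x)).length
      ≤ (PySem.List.sorted (b.map (fun x => -x)) (fun x => x)).length := by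
    rw [(PySem.List.sorted_perm _ _ _).length_eq, (PySem.List.sorted_perm _ _ _).length_eq]
    simpa using h
  rw [pvALoop_eq _ 0 _ hpb hlen]
  rw [pvBLoop_eq]
  simp only [List.drop_zero, Option.getD_some, zero_add]
  rw [← sorted_neg, ← sorted_neg]
  exact pvF_eq_pvG _ _ hpa hpb hlen

-- ===== VERDICT (by name: the statement is the Claim_ definition above) =====
theorem solution_spec : Claim_equal_solution := by
  intro a b _ hpre
  unfold Spec_solution
  exact pvFinal a b hpre
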